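-- pv_equiv track=rewrite | github.com/calenwu/marl | unused/multi_ppo_algorithm/main.py | generate_action_space
-- ===== SOURCE A (Python) =====
-- def generate_action_space(n, l):
-- 	if n == 0:
-- 		return l
-- 	len_l = len(l)
-- 	for li in range(len_l):
-- 		temp = l.pop(0)
-- 		for i in range(5):
-- 			l.append(temp.copy() + [i])
-- 	l = generate_action_space(n-1, l)
-- 	return l
-- ===== SOURCE B (Python) =====
-- def generate_action_space(n, l):
--     if n == 0:
--         return l
--     total = 5 ** n
--     l[:] = [base + [(k // 5 ** (n - 1 - j)) % 5 for j in range(n)]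
--             for base in l for k in range(total)]
--     return l
-- ===== Notes on version B (the rewrite author's own statement) =====
-- stated objective: simpler
-- what changed: Replaces A's recursion of n in-place pop/append expansion passes with a single comprehension that, for each base row, enumerates k in range(5**n) and decodes k into its n base-5 digits (most significant first); the list is rebuilt once via l[:] so the same object is mutated and returned.
import Mathlib
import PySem

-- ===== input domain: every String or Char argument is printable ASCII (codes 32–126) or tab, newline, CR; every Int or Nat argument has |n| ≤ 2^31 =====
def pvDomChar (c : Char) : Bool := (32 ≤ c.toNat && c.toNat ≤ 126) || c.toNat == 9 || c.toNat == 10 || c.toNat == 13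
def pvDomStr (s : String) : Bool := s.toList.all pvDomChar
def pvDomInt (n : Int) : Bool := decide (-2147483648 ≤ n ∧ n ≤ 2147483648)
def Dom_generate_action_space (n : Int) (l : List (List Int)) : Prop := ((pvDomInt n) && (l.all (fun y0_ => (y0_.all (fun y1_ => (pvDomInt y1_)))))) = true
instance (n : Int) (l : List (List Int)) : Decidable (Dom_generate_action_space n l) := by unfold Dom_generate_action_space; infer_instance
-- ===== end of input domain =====

-- B rebuilds the list in ONE comprehension, decoding each index k < 5^n into its base-5
-- digits, instead of A's recursion of n in-place expansion passes (simpler decomposition).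
-- Both Pythons mutate l in place and return the same object; equivalence here is about
-- the returned value.

-- ===== PORT A =====
-- one pass of A's `for li in range(len_l)` loop: pop the head, append its 5 extensions
def pvPassLoop : Nat → List (List Int) → List (List Int)
  | 0, l => l
  | k+1, l =>
    match l with
    | [] => []  -- l.pop(0) would raise; unreachable for the call pvPassLoop l.length l
    | temp :: rest =>
      pvPassLoop k ((PySem.List.pyRange 0 5 1).foldl (fun acc i => acc ++ [temp ++ [i]]) rest)

def generate_action_space (n : Int) (l : List (List Int)) : List (List Int) :=
  if n = 0 then l
  else if n < 0 then l  -- Python recurses forever here (RecursionError); excluded by Pre_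
  else generate_action_space (n - 1) (pvPassLoop l.length l)
termination_by n.toNat
decreasing_by omega

-- ===== PORT B =====
-- the inner comprehension of Source B: the n base-5 digits of k, most significant first
def pvDigits (n : Int) (k : Int) : List Int :=
  (PySem.List.pyRange 0 n 1).map
    (fun j => PySem.Int.mod (PySem.Int.floordiv k ((5 : Int) ^ (n - 1 - j).toNat)) 5)

def generate_action_space_alt (n : Int) (l : List (List Int)) : List (List Int) :=
  if n = 0 then l
  else
    let total : Int := (5 : Int) ^ n.toNat
    l.flatMap (fun base => (PySem.List.pyRange 0 total 1).map (fun k => base ++ pvDigits n k))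

-- ===== PRECONDITION & SPEC =====
-- Pre_ excludes n < 0, where Python A hits RecursionError (and B a TypeError).
def Pre_generate_action_space (n : Int) (l : List (List Int)) : Prop := 0 ≤ n
instance (n : Int) (l : List (List Int)) : Decidable (Pre_generate_action_space n l) := by
  unfold Pre_generate_action_space; infer_instance

def pvWitness_generate_action_space : Int × List (List Int) := (2, [[0], [1, 3]])

def Spec_generate_action_space (n : Int) (l : List (List Int)) (out : List (List Int)) : Prop := out = generate_action_space_alt n l
instance (n : Int) (l : List (List Int)) (out : List (List Int)) : Decidable (Spec_generate_action_space n l out) := by unfold Spec_generate_action_space; infer_instance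

-- ===== CLAIM (what is proved, stated in full; the proofs are below) =====
def Claim_equal_generate_action_space : Prop := ∀ (n : Int) (l : List (List Int)), Dom_generate_action_space n l → Pre_generate_action_space n l → Spec_generate_action_space n l (generate_action_space n l)

-- ===== LEMMAS AND PROOFS =====

-- canonical list of all length-m digit strings over {0..4}, lexicographic
def pvS : Nat → List (List Int)
  | 0 => [[]]
  | m+1 => (List.range 5).flatMap (fun (i : Nat) => (pvS m).map (fun c => (Int.ofNat i) :: c))

theorem pvPassLoop_spec (rest processed : List (List Int)) :
    pvPassLoop rest.length (rest ++ processed) =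
      processed ++ rest.flatMap (fun t => (List.range 5).map (fun (i : Nat) => t ++ [Int.ofNat i])) := by
  induction rest generalizing processed with
  | nil => simp [pvPassLoop]
  | cons t rest ih =>
    have h5 : PySem.List.pyRange 0 5 1 = [0, 1, 2, 3, 4] := by decide
    show pvPassLoop (rest.length + 1) (t :: (rest ++ processed)) = _
    simp only [pvPassLoop, h5, List.foldl]
    rw [show (rest ++ processed) ++ [t ++ [(0:Int)]] ++ [t ++ [(1:Int)]] ++ [t ++ [(2:Int)]]
          ++ [t ++ [(3:Int)]] ++ [t ++ [(4:Int)]]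
        = rest ++ (processed ++ [t ++ [0], t ++ [1], t ++ [2], t ++ [3], t ++ [4]]) by simp]
    rw [ih]
    simp [List.range_succ]

theorem generate_action_space_eq_pvS (m : Nat) (l : List (List Int)) :
    generate_action_space (m : Int) l = l.flatMap (fun b => (pvS m).map (fun c => b ++ c)) := by
  induction m generalizing l with
  | zero => simp [generate_action_space, pvS]
  | succ m ih =>
    rw [generate_action_space]
    have h0 : ¬ ((m + 1 : Nat) : Int) = 0 := by omega
    have h1 : ¬ ((m + 1 : Nat) : Int) < 0 := by omega
    rw [if_neg h0, if_neg h1]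
    have hs : ((m + 1 : Nat) : Int) - 1 = (m : Int) := by omega
    have hpass := pvPassLoop_spec l []
    rw [List.append_nil] at hpass
    rw [hs, hpass, ih]
    rw [List.nil_append, List.flatMap_assoc]
    congr 1; funext t
    rw [List.flatMap_map]
    show _ = (pvS (m+1)).map (fun c => t ++ c)
    simp only [pvS, List.map_flatMap, List.map_map]
    congr 1; funext i
    simp

-- digit decomposition: for 0 ≤ q < 5, 0 ≤ r < 5^m, the digits of q*5^m + r are q followed by those of r
theorem pvDigits_decomp (m : Nat) (q r : Int) (hq0 : 0 ≤ q) (hq : q < 5)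
    (hr0 : 0 ≤ r) (hr : r < (5 : Int) ^ m) :
    pvDigits ((m + 1 : Nat) : Int) (q * (5 : Int) ^ m + r) = q :: pvDigits (m : Int) r := by
  unfold pvDigits
  rw [PySem.List.pyRange_one_cons (by exact_mod_cast Nat.succ_pos m)]
  rw [List.map_cons]
  congr 1
  · -- head digit: (k // 5^m) % 5 = q
    have he : (((m + 1 : Nat) : Int) - 1 - 0).toNat = m := by omega
    rw [he]
    have hpow : (0 : Int) < (5 : Int) ^ m := by positivity
    rw [PySem.Int.floordiv_eq_ediv_of_pos hpow]
    rw [add_comm (q * (5:Int)^m) r]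
    rw [Int.add_mul_ediv_right r q (by omega : (5:Int)^m ≠ 0)]
    rw [Int.ediv_eq_zero_of_lt hr0 hr, zero_add]
    rw [PySem.Int.mod_eq_emod_of_pos (by omega)]
    rw [Int.emod_eq_of_lt hq0 hq]
  · -- remaining digits: shift the index by one and agree pointwise on members
    rw [zero_add]
    have hsplit : PySem.List.pyRange 1 ((m + 1 : Nat) : Int) 1
        = (PySem.List.pyRange 0 ((m : Nat) : Int) 1).map (fun j => j + 1) := by
      rw [PySem.List.pyRange_one, PySem.List.pyRange_one]
      have h1 : (((m + 1 : Nat) : Int) - 1).toNat = (((m : Nat) : Int) - 0).toNat := by omega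
      rw [h1, List.map_map]
      refine List.map_congr_left (fun k _ => ?_)
      simp only [Function.comp_apply]
      omega
    rw [hsplit, List.map_map]
    refine List.map_congr_left (fun j hj => ?_)
    rw [PySem.List.mem_pyRange_one] at hj
    simp only [Function.comp_apply]
    -- exponent is the same on both sides
    set e : Nat := ((m : Int) - 1 - j).toNat with hedef
    have hee : (((m + 1 : Nat) : Int) - 1 - (j + 1)).toNat = e := by omega
    have hem : e + 1 ≤ m := by omega
    rw [hee]
    have hpow : (0 : Int) < (5 : Int) ^ e := by positivity
    rw [PySem.Int.floordiv_eq_ediv_of_pos hpow, PySem.Int.floordiv_eq_ediv_of_pos hpow]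
    rw [PySem.Int.mod_eq_emod_of_pos (by omega : (0:Int) < 5),
        PySem.Int.mod_eq_emod_of_pos (by omega : (0:Int) < 5)]
    have hm : (5 : Int) ^ m = (5 : Int) ^ (m - e) * (5 : Int) ^ e := by
      rw [← pow_add]; congr 1; omega
    rw [hm, ← mul_assoc]
    rw [add_comm (q * (5:Int)^(m-e) * (5:Int)^e) r]
    rw [Int.add_mul_ediv_right r (q * (5:Int)^(m-e)) (by omega : (5:Int)^e ≠ 0)]
    have hme : m - e = (m - e - 1) + 1 := by omega
    rw [hme, pow_succ, ← mul_assoc]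
    omega

-- the k-loop over range(5^m) decoded to digits enumerates pvS m in order
theorem pvRange_block (a b : Nat) :
    List.range (a * b) = (List.range a).flatMap (fun q => (List.range b).map (fun r => q * b + r)) := by
  induction a with
  | zero => simp
  | succ a ih =>
    rw [Nat.succ_mul, List.range_add, ih, List.range_succ, List.flatMap_append]
    simp [Nat.add_comm]

theorem pvRange_digits (m : Nat) :
    (List.range (5 ^ m)).map (fun k => pvDigits (m : Int) ((k : Nat) : Int)) = pvS m := by
  induction m with
  | zero => simp [pvDigits, pvS]
  | succ m ih =>
    rw [pow_succ, mul_comm, pvRange_block 5 (5 ^ m), List.map_flatMap]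
    show _ = pvS (m + 1)
    rw [pvS]
    refine List.flatMap_congr (fun q hq => ?_)
    rw [List.mem_range] at hq
    rw [List.map_map, ← ih, List.map_map]
    refine List.map_congr_left (fun r hr => ?_)
    rw [List.mem_range] at hr
    simp only [Function.comp_apply]
    have hcast : ((q * 5 ^ m + r : Nat) : Int) = (q : Int) * (5 : Int) ^ m + (r : Int) := by
      push_cast; ring
    rw [hcast]
    rw [pvDigits_decomp m (q : Int) (r : Int) (by omega) (by exact_mod_cast hq)
        (by omega) (by exact_mod_cast hr)]
    rfl

theorem generate_action_space_alt_eq_pvS (m : Nat) (l : List (List Int)) (hm : m ≠ 0) :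
    generate_action_space_alt ((m : Nat) : Int) l = l.flatMap (fun b => (pvS m).map (fun c => b ++ c)) := by
  unfold generate_action_space_alt
  rw [if_neg (by omega : ¬ ((m : Nat) : Int) = 0)]
  simp only [Int.toNat_natCast]
  have hN : ((5 : Int) ^ m) = ((5 ^ m : Nat) : Int) := by push_cast; ring
  rw [hN, PySem.List.pyRange_zero_natCast]
  congr 1; funext base
  rw [List.map_map, ← pvRange_digits m, List.map_map]
  refine List.map_congr_left (fun k _ => ?_)
  simp

-- ===== VERDICT (by name: the statement is the Claim_ definition above) =====
theorem generate_action_space_spec : Claim_equal_generate_action_space := by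
  intro n l _hdom hpre
  unfold Pre_generate_action_space at hpre
  unfold Spec_generate_action_space
  obtain ⟨m, rfl⟩ : ∃ m : Nat, n = (m : Int) := ⟨n.toNat, by omega⟩
  rw [generate_action_space_eq_pvS]
  by_cases h : m = 0
  · subst h
    simp [generate_action_space_alt, pvS]
  · rw [generate_action_space_alt_eq_pvS m l h]
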